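-- pv_equiv track=rewrite | github.com/seanmatheny/scribe-pdf-getter | script/scribe_watcher_macos.py | parse_mtp_blocks
-- ===== SOURCE A (Python) =====
-- from typing import Dict, List, Optional, Set, Tuple
--
-- def parse_mtp_blocks(output: str) -> List[Dict[str, str]]:
--     blocks: List[Dict[str, str]] = []
--     current: Dict[str, str] = {}
--
--     for raw_line in output.splitlines():
--         line = raw_line.strip()
--         if not line:
--             if current:
--                 blocks.append(current)
--                 current = {}
--             continue
--         if ":" not in line:
--             continue
--         key, value = line.split(":", 1)
--         current[key.strip()] = value.strip()
--
--     if current: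
--         blocks.append(current)
--     return blocks
-- ===== SOURCE B (Python) =====
-- from typing import Dict, List
--
-- def _block_dict(run: List[str]) -> Dict[str, str]:
--     d: Dict[str, str] = {}
--     for line in run:
--         line = line.strip()
--         if ":" in line:
--             key, value = line.split(":", 1)
--             d[key.strip()] = value.strip()
--     return d
--
-- def parse_mtp_blocks(output: str) -> List[Dict[str, str]]:
--     lines = output.splitlines()
--     n = len(lines)
--     runs: List[List[str]] = []
--     i = 0
--     while i < n:
--         if not lines[i].strip():
--             i += 1
--             continue
--         j = i
--         while j < n and lines[j].strip():
--             j += 1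
--         runs.append(lines[i:j])
--         i = j
--     blocks = [_block_dict(run) for run in runs]
--     return [d for d in blocks if d]
-- ===== Notes on version B (the rewrite author's own statement) =====
-- stated objective: alternative
-- what changed: Replaces the single-pass flush-on-blank dict accumulator with a group-then-parse pipeline: a two-pointer scan first slices the lines into maximal non-blank runs, each run is then mapped to a dict by a separate helper, and finally empty dicts are filtered out.
import Mathlib
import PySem

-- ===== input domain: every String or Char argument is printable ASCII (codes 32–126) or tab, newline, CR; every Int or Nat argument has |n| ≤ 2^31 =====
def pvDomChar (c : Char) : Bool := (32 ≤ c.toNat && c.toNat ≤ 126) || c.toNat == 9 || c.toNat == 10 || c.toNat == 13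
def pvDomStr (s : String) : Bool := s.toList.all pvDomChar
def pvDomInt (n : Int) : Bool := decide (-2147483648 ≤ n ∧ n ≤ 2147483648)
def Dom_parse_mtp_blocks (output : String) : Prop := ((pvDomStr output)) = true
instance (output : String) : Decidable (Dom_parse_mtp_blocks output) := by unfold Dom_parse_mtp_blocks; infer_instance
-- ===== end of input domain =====

-- B replaces A's single-pass flush-on-blank dict accumulator by a group-then-parse pipeline
-- (two-pointer split into non-blank runs, map each run to a dict, filter empty dicts); alternative decomposition, same cost.

-- ===== PORT A =====
-- the body of A's for-loop (state: (blocks, current))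
def pvStepA (st : List (PySem.Dict String String) × PySem.Dict String String) (raw_line : String) :
    List (PySem.Dict String String) × PySem.Dict String String :=
  let line := PySem.Str.strip raw_line
  if line == "" then
    if st.2.items.isEmpty then st else (st.1 ++ [st.2], PySem.Dict.empty)
  else if PySem.Str.isIn ":" line then
    match PySem.Str.splitMax? line ":" 1 with
    | some (key :: value :: _) => (st.1, st.2.insert (PySem.Str.strip key) (PySem.Str.strip value))
    | _ => st
  else st

def parse_mtp_blocks (output : String) : List (List (String × String)) :=
  let r := (PySem.Str.splitlines output).foldl pvStepA ([], PySem.Dict.empty)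
  let blocks := if r.2.items.isEmpty then r.1 else r.1 ++ [r.2]
  blocks.map PySem.Dict.items

-- ===== PORT B =====
-- 'not lines[j].strip()' (whitespace-only line)
def pvBlank (s : String) : Bool := PySem.Str.strip s == ""

-- the inner 'while j < n and lines[j].strip(): j += 1' scan: first index ≥ j that is blank or past the end
def pvScan (lines : List String) (j : Nat) : Nat :=
  if h : j < lines.length then
    if pvBlank lines[j] then j else pvScan lines (j + 1)
  else j
termination_by lines.length - j

lemma pvScan_le (lines : List String) (j : Nat) : j ≤ pvScan lines j := by
  unfold pvScan
  split
  · split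
    · exact le_refl j
    · exact le_trans (Nat.le_succ j) (pvScan_le lines (j + 1))
  · exact le_refl j
termination_by lines.length - j

lemma pvScan_gt (lines : List String) (i : Nat) (h : i < lines.length)
    (hnb : pvBlank lines[i] = false) : i + 1 ≤ pvScan lines i := by
  unfold pvScan
  rw [dif_pos h, if_neg (by simp [hnb])]
  exact pvScan_le lines (i + 1)

-- the outer while loop collecting slices lines[i:j] (the maximal non-blank runs)
def pvRunsLoop (lines : List String) (i : Nat) : List (List String) :=
  if h : i < lines.length then
    if pvBlank lines[i] then pvRunsLoop lines (i + 1)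
    else
      let j := pvScan lines i
      PySem.List.slice lines (some (i : Int)) (some (j : Int)) :: pvRunsLoop lines j
  else []
termination_by lines.length - i
decreasing_by
  · omega
  · rename_i hnb
    have := pvScan_gt lines i h (by simpa using hnb)
    omega

-- the body of _block_dict's for-loop
def pvStepB (d : PySem.Dict String String) (raw_line : String) : PySem.Dict String String :=
  let line := PySem.Str.strip raw_line
  if PySem.Str.isIn ":" line then
    match PySem.Str.splitMax? line ":" 1 with
    | some (key :: value :: _) => d.insert (PySem.Str.strip key) (PySem.Str.strip value)
    | _ => d
  else d

-- _block_dict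
def pvBlockDict (run : List String) : PySem.Dict String String :=
  run.foldl pvStepB PySem.Dict.empty

def parse_mtp_blocks_alt (output : String) : List (List (String × String)) :=
  let lines := PySem.Str.splitlines output
  let runs := pvRunsLoop lines 0
  let blocks := runs.map pvBlockDict
  (blocks.filter (fun d => !d.items.isEmpty)).map PySem.Dict.items

-- ===== PRECONDITION & SPEC =====
def Spec_parse_mtp_blocks (output : String) (out : List (List (String × String))) : Prop := out = parse_mtp_blocks_alt output
instance (output : String) (out : List (List (String × String))) : Decidable (Spec_parse_mtp_blocks output out) := by unfold Spec_parse_mtp_blocks; infer_instance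

-- ===== CLAIM (what is proved, stated in full; the proofs are below) =====
def Claim_equal_parse_mtp_blocks : Prop := ∀ (output : String), Dom_parse_mtp_blocks output → Spec_parse_mtp_blocks output (parse_mtp_blocks output)

-- ===== LEMMAS AND PROOFS =====

-- finishing step of A: flush the pending dict if non-empty
def pvFinishA (st : List (PySem.Dict String String) × PySem.Dict String String) :
    List (PySem.Dict String String) :=
  if st.2.items.isEmpty then st.1 else st.1 ++ [st.2]

-- list-level model of B's grouping
def pvRunsList : List String → List (List String)
  | [] => []
  | l :: rest =>
    if pvBlank l then pvRunsList rest
    else (l :: rest.takeWhile (fun s => !pvBlank s)) ::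
      pvRunsList (rest.dropWhile (fun s => !pvBlank s))
termination_by ls => ls.length
decreasing_by
  · simp only [List.length_cons]; omega
  · simp only [List.length_cons]
    exact Nat.lt_succ_of_le (List.length_dropWhile_le _ _)

-- list-level model of A's loop: the sequence of dicts A closes, starting from pending dict cur
def pvProcFrom (cur : PySem.Dict String String) : List String → List (PySem.Dict String String)
  | [] => [cur]
  | l :: rest =>
    if pvBlank l then cur :: pvProcFrom PySem.Dict.empty rest
    else pvProcFrom (pvStepB cur l) rest

def pvNE (d : PySem.Dict String String) : Bool := !d.items.isEmpty

lemma pvNE_empty : pvNE PySem.Dict.empty = false := rfl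

lemma pv_items_empty {d : PySem.Dict String String} (h : d.items.isEmpty = true) :
    d = PySem.Dict.empty := by
  apply PySem.Dict.ext
  simpa [List.isEmpty_iff] using h

lemma pvStepA_blank (st : List (PySem.Dict String String) × PySem.Dict String String)
    (l : String) (hb : pvBlank l = true) :
    pvStepA st l = if st.2.items.isEmpty then st else (st.1 ++ [st.2], PySem.Dict.empty) := by
  simp only [pvStepA, pvBlank] at *
  rw [if_pos hb]

lemma pvStepA_nonblank (st : List (PySem.Dict String String) × PySem.Dict String String)
    (l : String) (hb : pvBlank l = false) :
    pvStepA st l = (st.1, pvStepB st.2 l) := by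
  simp only [pvStepA, pvStepB, pvBlank] at *
  rw [if_neg (by simp [hb])]
  split
  · split <;> rfl
  · rfl

-- A's loop from state (blocks, cur) equals blocks ++ the non-empty dicts among pvProcFrom cur
lemma pvFoldA_eq (ls : List String) :
    ∀ (blocks : List (PySem.Dict String String)) (cur : PySem.Dict String String),
      pvFinishA (ls.foldl pvStepA (blocks, cur)) = blocks ++ (pvProcFrom cur ls).filter pvNE := by
  induction ls with
  | nil =>
    intro blocks cur
    simp only [List.foldl_nil, pvFinishA, pvProcFrom, List.filter, pvNE]
    cases h : cur.items.isEmpty <;> simp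
  | cons l rest ih =>
    intro blocks cur
    cases hb : pvBlank l with
    | true =>
      rw [List.foldl_cons, pvStepA_blank _ _ hb]
      cases h : cur.items.isEmpty with
      | true =>
        rw [if_pos rfl, ih blocks cur, pv_items_empty h]
        simp [pvProcFrom, hb, pvNE_empty]
      | false =>
        rw [if_neg (by simp), ih (blocks ++ [cur]) PySem.Dict.empty]
        simp [pvProcFrom, hb, pvNE, h]
    | false =>
      rw [List.foldl_cons, pvStepA_nonblank _ _ hb, ih]
      simp [pvProcFrom, hb]

lemma pvProcFrom_append (run : List String) :
    ∀ (tail : List String) (cur : PySem.Dict String String),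
      (∀ x ∈ run, pvBlank x = false) →
      pvProcFrom cur (run ++ tail) = pvProcFrom (run.foldl pvStepB cur) tail := by
  induction run with
  | nil => intro tail cur _; rfl
  | cons x xs ih =>
    intro tail cur h
    have hx : pvBlank x = false := h x (List.mem_cons_self)
    simp only [List.cons_append, pvProcFrom, hx, Bool.false_eq_true, if_false, List.foldl_cons]
    exact ih tail _ (fun y hy => h y (List.mem_cons_of_mem _ hy))

-- the dicts of A's closed blocks, filtered, are the dicts of B's runs, filtered
lemma pvProc_runs (n : Nat) : ∀ (ls : List String), ls.length ≤ n →
    (pvProcFrom PySem.Dict.empty ls).filter pvNE =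
      ((pvRunsList ls).map pvBlockDict).filter pvNE := by
  induction n with
  | zero =>
    intro ls h
    rw [Nat.le_zero, List.length_eq_zero_iff] at h
    subst h
    simp [pvProcFrom, pvRunsList, pvNE_empty]
  | succ n ih =>
    intro ls hlen
    match ls with
    | [] => simp [pvProcFrom, pvRunsList, pvNE_empty]
    | l :: rest =>
      cases hb : pvBlank l with
      | true =>
        simp only [pvProcFrom, pvRunsList, hb, if_pos]
        rw [List.filter_cons_of_neg (by simp [pvNE_empty])]
        exact ih rest (by simpa using Nat.lt_succ_iff.mp (Nat.lt_of_lt_of_le (by simp) hlen))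
      | false =>
        simp only [pvProcFrom, pvRunsList, hb, Bool.false_eq_true, if_false]
        have hsplit : rest = rest.takeWhile (fun s => !pvBlank s) ++ rest.dropWhile (fun s => !pvBlank s) :=
          (List.takeWhile_append_dropWhile).symm
        have hall : ∀ x ∈ rest.takeWhile (fun s => !pvBlank s), pvBlank x = false := by
          intro x hx
          have := List.mem_takeWhile_imp hx
          simpa using this
        conv_lhs => rw [hsplit]
        rw [pvProcFrom_append _ _ _ hall]
        have hbd : pvBlockDict (l :: rest.takeWhile (fun s => !pvBlank s)) =
            (rest.takeWhile (fun s => !pvBlank s)).foldl pvStepB (pvStepB PySem.Dict.empty l) := by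
          simp [pvBlockDict]
        have hdroplen : (rest.dropWhile (fun s => !pvBlank s)).length ≤ rest.length :=
          List.length_dropWhile_le _ _
        match hdw : rest.dropWhile (fun s => !pvBlank s) with
        | [] =>
          simp [pvProcFrom, pvRunsList, hbd]
        | b :: rest2 =>
          have hbblank : pvBlank b = true := by
            have h' := List.head_dropWhile_not (fun s => !pvBlank s) (l := rest) (by simp [hdw])
            simp only [hdw, List.head_cons] at h'
            simpa using h'
          have hlen2 : rest2.length ≤ n := by
            have h2 : (b :: rest2).length ≤ rest.length := hdw ▸ hdroplen
            simp only [List.length_cons] at h2 hlen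
            omega
          have hruns2 : pvRunsList (b :: rest2) = pvRunsList rest2 := by
            simp [pvRunsList, hbblank]
          simp [pvProcFrom, hbblank, hbd, hruns2, List.filter_cons, ih rest2 hlen2]

lemma pvTake_takeWhile {α : Type} (p : α → Bool) (l : List α) :
    l.take (l.takeWhile p).length = l.takeWhile p := by
  induction l with
  | nil => rfl
  | cons x xs ih =>
    by_cases h : p x = true
    · simp [h, ih]
    · simp [Bool.eq_false_iff.mpr h]


lemma pvDropWhile_eq_drop {α : Type} (p : α → Bool) (l : List α) :
    l.dropWhile p = l.drop (l.takeWhile p).length := by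
  induction l with
  | nil => rfl
  | cons x xs ih =>
    by_cases h : p x = true
    · simp [h, ih]
    · simp [Bool.eq_false_iff.mpr h]

lemma pvScan_spec (lines : List String) (n : Nat) : ∀ i, n = lines.length - i →
    pvScan lines i = i + ((lines.drop i).takeWhile (fun s => !pvBlank s)).length := by
  induction n with
  | zero =>
    intro i h
    have hle : lines.length ≤ i := by omega
    unfold pvScan
    rw [dif_neg (by omega)]
    simp [List.drop_eq_nil_of_le hle]
  | succ n ih =>
    intro i h
    have hi : i < lines.length := by omega
    have hdrop : lines.drop i = lines[i] :: lines.drop (i + 1) := List.drop_eq_getElem_cons hi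
    unfold pvScan
    rw [dif_pos hi]
    cases hb : pvBlank lines[i] with
    | true =>
      rw [if_pos rfl, hdrop, List.takeWhile_cons_of_neg (by simp [hb])]
      simp
    | false =>
      rw [if_neg (by simp), ih (i + 1) (by omega), hdrop,
        List.takeWhile_cons_of_pos (by simp [hb]), List.length_cons]
      omega

lemma pvRunsList_cons_blank (l : String) (rest : List String) (hb : pvBlank l = true) :
    pvRunsList (l :: rest) = pvRunsList rest := by
  simp [pvRunsList, hb]

lemma pvRunsList_cons_nonblank (l : String) (rest : List String) (hb : pvBlank l = false) :
    pvRunsList (l :: rest) = (l :: rest.takeWhile (fun s => !pvBlank s)) ::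
      pvRunsList (rest.dropWhile (fun s => !pvBlank s)) := by
  simp [pvRunsList, hb]

lemma pvRunsLoop_eq (lines : List String) (i : Nat) :
    pvRunsLoop lines i = pvRunsList (lines.drop i) := by
  unfold pvRunsLoop
  by_cases hi : i < lines.length
  · rw [dif_pos hi]
    have hdrop : lines.drop i = lines[i] :: lines.drop (i + 1) := List.drop_eq_getElem_cons hi
    cases hb : pvBlank lines[i] with
    | true =>
      rw [if_pos rfl, pvRunsLoop_eq lines (i + 1), hdrop, pvRunsList_cons_blank _ _ hb]
    | false =>
      rw [if_neg (by simp)]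
      show PySem.List.slice lines (some (i : Int)) (some ((pvScan lines i : Nat) : Int)) ::
          pvRunsLoop lines (pvScan lines i) = pvRunsList (lines.drop i)
      set tw := (lines.drop (i + 1)).takeWhile (fun s => !pvBlank s) with htw
      have hscan : pvScan lines i = i + (1 + tw.length) := by
        rw [pvScan_spec lines (lines.length - i) i rfl, hdrop,
          List.takeWhile_cons_of_pos (by simp [hb]), List.length_cons, htw]
        omega
      have hslice : PySem.List.slice lines (some (i : Int)) (some ((pvScan lines i : Nat) : Int)) =
          lines[i] :: tw := by
        rw [PySem.List.slice_natCast, hscan, hdrop]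
        rw [show i + (1 + tw.length) - i = tw.length + 1 by omega]
        rw [List.take_succ_cons, htw, pvTake_takeWhile]
      have hdw : lines.drop (pvScan lines i) = (lines.drop (i + 1)).dropWhile (fun s => !pvBlank s) := by
        rw [pvDropWhile_eq_drop, ← htw, List.drop_drop, hscan]
        congr 1
        omega
      conv_rhs => rw [hdrop]
      rw [pvRunsList_cons_nonblank _ _ hb, pvRunsLoop_eq lines (pvScan lines i), hdw, hslice, htw]
  · rw [dif_neg hi]
    rw [List.drop_eq_nil_of_le (by omega)]
    simp [pvRunsList]
termination_by lines.length - i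
decreasing_by
  all_goals omega

-- ===== VERDICT (by name: the statement is the Claim_ definition above) =====
theorem parse_mtp_blocks_spec : Claim_equal_parse_mtp_blocks := by
  intro output _
  unfold Spec_parse_mtp_blocks
  rw [show parse_mtp_blocks output =
      (pvFinishA ((PySem.Str.splitlines output).foldl pvStepA ([], PySem.Dict.empty))).map
        PySem.Dict.items from rfl]
  rw [show parse_mtp_blocks_alt output =
      (((pvRunsLoop (PySem.Str.splitlines output) 0).map pvBlockDict).filter pvNE).map
        PySem.Dict.items from rfl]
  rw [pvFoldA_eq (PySem.Str.splitlines output) [] PySem.Dict.empty, List.nil_append]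
  rw [pvProc_runs (PySem.Str.splitlines output).length _ le_rfl]
  rw [pvRunsLoop_eq (PySem.Str.splitlines output) 0, List.drop_zero]
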